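-- pv_equiv track=rewrite | github.com/4estlaine/skills | data_util.py | known_path_length
-- ===== SOURCE A (Python) =====
-- def known_path_length(path):
--     length = 0
--     for block in path:
--         if block == 'blue':
--             length += 3
--         elif block == 'red':
--             length += 4
--         elif block == 'orange':
--             length += 5
--         elif block == 'purple':
--             length += 4
--         elif block == 'green':
--             length += 5
--     return length
-- ===== SOURCE B (Python) =====
-- def known_path_length(path):
--     weights = {'blue': 3, 'red': 4, 'orange': 5, 'purple': 4, 'green': 5}
--     counts = {}
--     for block in path:
--         counts[block] = counts.get(block, 0) + 1
--     return sum(weights[c] * n for c, n in counts.items() if c in weights)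
-- ===== Notes on version B (the rewrite author's own statement) =====
-- stated objective: alternative
-- what changed: B builds a frequency table of the path in one pass and then sums weight*count over the distinct colors using a weight map, instead of A's per-block if/elif chain accumulating into a running total.
import Mathlib
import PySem

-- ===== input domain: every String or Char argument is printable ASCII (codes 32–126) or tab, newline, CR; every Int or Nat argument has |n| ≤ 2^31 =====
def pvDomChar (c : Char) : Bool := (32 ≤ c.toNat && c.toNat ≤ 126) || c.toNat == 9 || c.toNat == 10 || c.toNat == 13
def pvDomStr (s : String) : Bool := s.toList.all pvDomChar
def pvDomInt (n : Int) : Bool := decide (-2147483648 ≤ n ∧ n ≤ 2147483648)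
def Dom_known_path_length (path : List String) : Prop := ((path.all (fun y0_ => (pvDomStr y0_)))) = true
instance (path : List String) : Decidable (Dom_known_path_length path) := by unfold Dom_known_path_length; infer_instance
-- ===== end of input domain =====

-- B counts blocks into a frequency table first, then sums weight*count over the distinct
-- colors via a weight map — a count-then-weight aggregation instead of A's per-block if-chain.


-- ===== PORT A =====
def known_path_length (path : List String) : Int :=
  path.foldl (fun length block =>
    if block == "blue" then length + 3
    else if block == "red" then length + 4
    else if block == "orange" then length + 5
    else if block == "purple" then length + 4
    else if block == "green" then length + 5
    else length) 0

-- ===== PORT B =====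
-- B-side helper: the local `weights` dict literal of Source B
def pvWeights : PySem.Dict String Int :=
  PySem.Dict.ofList [("blue", 3), ("red", 4), ("orange", 5), ("purple", 4), ("green", 5)]

-- `weights[c]` is ported as `getD c 0`: exact here because the `contains` guard ensures presence
def known_path_length_alt (path : List String) : Int :=
  let counts := path.foldl (fun d block => d.insert block (d.getD block 0 + 1)) PySem.Dict.empty
  counts.items.foldl
    (fun acc kv => if pvWeights.contains kv.1 then acc + pvWeights.getD kv.1 0 * kv.2 else acc) 0

-- ===== PRECONDITION & SPEC =====
def Spec_known_path_length (path : List String) (out : Int) : Prop := out = known_path_length_alt path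
instance (path : List String) (out : Int) : Decidable (Spec_known_path_length path out) := by unfold Spec_known_path_length; infer_instance

-- ===== CLAIM (what is proved, stated in full; the proofs are below) =====
def Claim_equal_known_path_length : Prop := ∀ (path : List String), Dom_known_path_length path → Spec_known_path_length path (known_path_length path)

-- ===== LEMMAS AND PROOFS =====

-- the per-block weight A's if-chain adds (0 for unknown colors)
def pvW (b : String) : Int :=
  if b == "blue" then 3
  else if b == "red" then 4
  else if b == "orange" then 5
  else if b == "purple" then 4
  else if b == "green" then 5
  else 0

theorem pvA_foldl (path : List String) (init : Int) :
    path.foldl (fun length block =>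
      if block == "blue" then length + 3
      else if block == "red" then length + 4
      else if block == "orange" then length + 5
      else if block == "purple" then length + 4
      else if block == "green" then length + 5
      else length) init = init + (path.map pvW).sum := by
  induction path generalizing init with
  | nil => simp
  | cons b t ih =>
    simp only [List.foldl_cons, List.map_cons, List.sum_cons, ih, pvW]
    split_ifs <;> ring

theorem pvB_foldl (l : List (String × Int)) (init : Int) :
    l.foldl (fun acc kv => if pvWeights.contains kv.1 then acc + pvWeights.getD kv.1 0 * kv.2 else acc) init
      = init + (l.map (fun kv => if pvWeights.contains kv.1 then pvWeights.getD kv.1 0 * kv.2 else 0)).sum := by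
  induction l generalizing init with
  | nil => simp
  | cons p t ih =>
    simp only [List.foldl_cons, List.map_cons, List.sum_cons, ih]
    split_ifs <;> ring

theorem pvWeights_term (k : String) (c : Int) :
    (if pvWeights.contains k then pvWeights.getD k 0 * c else 0) = pvW k * c := by
  by_cases h1 : k = "blue"
  · subst h1; simp [pvWeights, pvW]; rfl
  · by_cases h2 : k = "red"
    · subst h2; simp [pvWeights, pvW]; rfl
    · by_cases h3 : k = "orange"
      · subst h3; simp [pvWeights, pvW]; rfl
      · by_cases h4 : k = "purple"
        · subst h4; simp [pvWeights, pvW]; rfl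
        · by_cases h5 : k = "green"
          · subst h5; simp [pvWeights, pvW]; rfl
          · have hc : pvWeights.contains k = false := by
              rw [PySem.Dict.contains_eq_decide_mem_keys,
                show pvWeights.keys = ["blue", "red", "orange", "purple", "green"] from rfl]
              simp [h1, h2, h3, h4, h5]
            simp [hc, pvW, h1, h2, h3, h4, h5]

theorem pvSet_toFinset (l : List String) : (PySem.Set.ofList l).toFinset = l.toFinset := by
  ext x; simp [PySem.Set.mem_ofList]

-- ===== VERDICT (by name: the statement is the Claim_ definition above) =====
theorem known_path_length_spec : Claim_equal_known_path_length := by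
  intro path _
  show known_path_length path = known_path_length_alt path
  unfold known_path_length known_path_length_alt
  rw [pvA_foldl]
  simp only [PySem.Dict.foldl_insert_getD_add_one_eq_counter, PySem.Dict.items_counter,
    pvB_foldl, List.map_map, Function.comp_def, pvWeights_term]
  have hB : ((PySem.Set.ofList path).map (fun k => pvW k * (path.count k : Int))).sum
      = (path.map pvW).sum := by
    rw [← List.sum_toFinset _ (PySem.Set.nodup_ofList path), pvSet_toFinset,
      Finset.sum_list_map_count]
    refine Finset.sum_congr rfl (fun x _ => ?_)
    rw [nsmul_eq_mul, mul_comm]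
  rw [hB]
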